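-- pv_equiv track=rewrite | github.com/ship-shaban/vision-zero | app.py | sort_with_special_values_last
-- ===== SOURCE A (Python) =====
-- from typing import Dict, List, Any, Optional, Tuple, Union
--
-- def sort_with_special_values_last(value_list: List[Any]) -> List[str]:
--     """Sort values alphabetically but move special values (Unknown, Other, NA, Pending) to the end"""
--     def get_sort_key(value_str):
--         lower_val = str(value_str).lower().strip()
--         # Check for special values that should appear at the end
--         special_values = ['unknown', 'other', 'na', 'n/a', 'pending', 'smv other', '']
--         if lower_val in special_values or '(unknown)' in lower_val:
--             return (1, value_str)  # Sort group 1 (end), then by original value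
--         return (0, value_str)  # Sort group 0 (normal), then alphabetically
--
--     return sorted([str(v) for v in value_list], key=get_sort_key)
-- ===== SOURCE B (Python) =====
-- # B: single-pass partition into normal/special buckets, then plain sorted() on each
-- # bucket and concatenation; same result as A's one tuple-keyed sort (stable sort by
-- # (group, value) == sorted group-0 strings followed by sorted group-1 strings).
-- from typing import List, Any
--
--
-- def sort_with_special_values_last(value_list: List[Any]) -> List[str]:
--     special_values = ['unknown', 'other', 'na', 'n/a', 'pending', 'smv other', '']
--
--     normal = []
--     special = []
--     for v in value_list:
--         s = str(v)
--         lower_val = s.lower().strip()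
--         if lower_val in special_values or '(unknown)' in lower_val:
--             special.append(s)
--         else:
--             normal.append(s)
--     return sorted(normal) + sorted(special)
-- ===== Notes on version B (the rewrite author's own statement) =====
-- stated objective: alternative
-- what changed: Replaces the single sort with a tuple key (group, value) by a one-pass partition into normal/special buckets followed by two plain default-order sorts concatenated.
import Mathlib
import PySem

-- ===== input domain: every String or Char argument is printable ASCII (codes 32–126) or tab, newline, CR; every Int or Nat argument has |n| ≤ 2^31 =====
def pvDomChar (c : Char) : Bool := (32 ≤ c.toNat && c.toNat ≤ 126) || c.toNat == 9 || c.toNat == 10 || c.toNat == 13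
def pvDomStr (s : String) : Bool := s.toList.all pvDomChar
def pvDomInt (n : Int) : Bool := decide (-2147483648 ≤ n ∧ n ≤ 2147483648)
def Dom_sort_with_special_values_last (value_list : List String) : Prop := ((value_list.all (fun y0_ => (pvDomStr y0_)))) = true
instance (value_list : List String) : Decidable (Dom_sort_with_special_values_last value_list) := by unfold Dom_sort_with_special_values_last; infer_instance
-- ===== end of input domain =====

-- B replaces A's single tuple-keyed sort by a one-pass partition into two buckets,
-- each sorted with the default order and concatenated (objective: alternative).

-- The special-value test shared textually by A's get_sort_key and B's partition loop:
-- lower_val = str(v).lower().strip(); lower_val in special_values or '(unknown)' in lower_val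
def pvSpecial (s : String) : Bool :=
  let lower_val := PySem.Str.strip (PySem.Str.lower s)
  (["unknown", "other", "na", "n/a", "pending", "smv other", ""].contains lower_val)
    || PySem.Str.isIn "(unknown)" lower_val

-- ===== PORT A =====
-- sorted([str(v) for v in value_list], key=get_sort_key); str(v) on a string is the identity,
-- so the comprehension is the identity map; the tuple key (group, value_str) is sorted2.
def sort_with_special_values_last (value_list : List String) : List String :=
  PySem.List.sorted2 (value_list.map (fun v => v))
    (fun s => if pvSpecial s then (1 : Int) else 0) (fun s => s)

-- ===== PORT B =====
-- one loop appending each stringified element to `normal` or `special`, then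
-- sorted(normal) + sorted(special) with the default comparison
def sort_with_special_values_last_alt (value_list : List String) : List String :=
  let buckets := value_list.foldl
    (fun (acc : List String × List String) v =>
      if pvSpecial v then (acc.1, acc.2 ++ [v]) else (acc.1 ++ [v], acc.2))
    ([], [])
  PySem.List.sorted buckets.1 (fun s => s) ++ PySem.List.sorted buckets.2 (fun s => s)

-- ===== PRECONDITION & SPEC =====
def Spec_sort_with_special_values_last (value_list : List String) (out : List String) : Prop := out = sort_with_special_values_last_alt value_list
instance (value_list : List String) (out : List String) : Decidable (Spec_sort_with_special_values_last value_list out) := by unfold Spec_sort_with_special_values_last; infer_instance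

-- ===== CLAIM (what is proved, stated in full; the proofs are below) =====
def Claim_equal_sort_with_special_values_last : Prop := ∀ (value_list : List String), Dom_sort_with_special_values_last value_list → Spec_sort_with_special_values_last value_list (sort_with_special_values_last value_list)

-- ===== LEMMAS AND PROOFS =====

-- A stable sort with a lexicographic tuple key is the stable sort with the toLex key.
theorem pv_sorted2_eq_sorted_lex {α κ₁ κ₂ : Type} [LinearOrder κ₁] [LinearOrder κ₂]
    (xs : List α) (k1 : α → κ₁) (k2 : α → κ₂) :
    PySem.List.sorted2 xs k1 k2 false
      = PySem.List.sorted xs (fun x => toLex (k1 x, k2 x)) false := by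
  unfold PySem.List.sorted2 PySem.List.sorted
  simp only [if_neg (by decide : ¬ (false = true))]
  have hb : (fun a b => decide (k1 a < k1 b) || !decide (k1 b < k1 a) && decide (k2 a < k2 b))
      = fun a b => decide ((fun x => toLex (k1 x, k2 x)) a < (fun x => toLex (k1 x, k2 x)) b) := by
    funext a b
    rcases lt_trichotomy (k1 a) (k1 b) with h|h|h
    · simp [h, Prod.Lex.lt_iff, asymm h]
    · simp [h, Prod.Lex.lt_iff]
    · simp [Prod.Lex.lt_iff, asymm h, h]
      exact fun he => absurd he (ne_of_gt h)
  rw [hb]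

-- B's partition loop produces exactly (filter ¬special, filter special), each
-- appended behind the running accumulators.
theorem pv_partition_foldl (xs : List String) (n sp : List String) :
    xs.foldl
      (fun (acc : List String × List String) v =>
        if pvSpecial v then (acc.1, acc.2 ++ [v]) else (acc.1 ++ [v], acc.2))
      (n, sp)
    = (n ++ xs.filter (fun s => !pvSpecial s), sp ++ xs.filter (fun s => pvSpecial s)) := by
  induction xs generalizing n sp with
  | nil => simp
  | cons x t ih =>
    by_cases hx : pvSpecial x
    · simp [List.foldl_cons, hx, ih]
    · simp [List.foldl_cons, hx, ih]

-- The tuple key of A, injective (second component recovers the string).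
def pvKey (s : String) : Int ×ₗ String := toLex ((if pvSpecial s then (1 : Int) else 0), s)

theorem pvKey_injective : Function.Injective pvKey := by
  intro a b h
  have := congrArg (fun p => (ofLex p).2) h
  simpa [pvKey] using this

theorem pv_main (xs : List String) :
    sort_with_special_values_last xs = sort_with_special_values_last_alt xs := by
  unfold sort_with_special_values_last sort_with_special_values_last_alt
  simp only [List.map_id_fun', id]
  rw [pv_partition_foldl xs [] []]
  simp only [List.nil_append]
  rw [pv_sorted2_eq_sorted_lex]
  apply PySem.List.eq_of_perm_of_pairwise_le_of_injective pvKey pvKey_injective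
  · -- permutation: both sides permute xs
    have h1 := PySem.List.sorted_perm (xs.filter (fun s => !pvSpecial s)) (fun v => v) false
    have h2 := PySem.List.sorted_perm (xs.filter (fun s => pvSpecial s)) (fun v => v) false
    have hfl : ((xs.filter (fun s => !pvSpecial s)) ++ (xs.filter (fun s => pvSpecial s))).Perm xs :=
      List.perm_append_comm.trans (List.filter_append_perm pvSpecial xs)
    exact (PySem.List.sorted_perm xs _ false).trans (((h1.append h2).trans hfl)).symm
  · exact PySem.List.sorted_pairwise xs _
  · -- the concatenation is pairwise key-nondecreasing
    refine List.pairwise_append.mpr ⟨?_, ?_, ?_⟩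
    · refine (PySem.List.sorted_pairwise _ _).imp_of_mem ?_
      intro a b ha hb hle
      have ha' : pvSpecial a = false := by
        have := (List.mem_filter.mp ((PySem.List.mem_sorted _ _ _ _).mp ha)).2
        simpa using this
      have hb' : pvSpecial b = false := by
        have := (List.mem_filter.mp ((PySem.List.mem_sorted _ _ _ _).mp hb)).2
        simpa using this
      simpa [pvKey, ha', hb', Prod.Lex.le_iff] using hle
    · refine (PySem.List.sorted_pairwise _ _).imp_of_mem ?_
      intro a b ha hb hle
      have ha' : pvSpecial a = true := (List.mem_filter.mp ((PySem.List.mem_sorted _ _ _ _).mp ha)).2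
      have hb' : pvSpecial b = true := (List.mem_filter.mp ((PySem.List.mem_sorted _ _ _ _).mp hb)).2
      simpa [pvKey, ha', hb', Prod.Lex.le_iff] using hle
    · intro a ha b hb
      have ha' : pvSpecial a = false := by
        have := (List.mem_filter.mp ((PySem.List.mem_sorted _ _ _ _).mp ha)).2
        simpa using this
      have hb' : pvSpecial b = true := (List.mem_filter.mp ((PySem.List.mem_sorted _ _ _ _).mp hb)).2
      simp [pvKey, ha', hb', Prod.Lex.le_iff]

-- ===== VERDICT (by name: the statement is the Claim_ definition above) =====
theorem sort_with_special_values_last_spec : Claim_equal_sort_with_special_values_last := by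
  intro xs _
  unfold Spec_sort_with_special_values_last
  exact pv_main xs
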